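-- pv_equiv track=rewrite | github.com/pycoddiy/typing_bot | struct_editor.py | _build_partial_content
-- ===== SOURCE A (Python) =====
-- from typing import List, Optional, Tuple
--
-- def _build_partial_content(lines: List[str], up_to_line: int) -> str:
--     """Build content that includes complete sections plus partial processing up to current line."""
--     result_lines = []
--     i = 0
--
--     while i <= up_to_line and i < len(lines):
--         line = lines[i].strip()
--
--         # Check if this is a section start
--         if line.startswith('<CODE') or line.startswith('<COMMANDS'):
--             # Find the matching closing tag
--             section_type = 'CODE' if line.startswith('<CODE') else 'COMMANDS'
--             closing_tag = f'</{section_type}'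
--
--             # Add the opening tag
--             result_lines.append(lines[i])
--             i += 1
--
--             # Process content within the section
--             section_content_lines = []
--             section_end_found = False
--
--             while i <= up_to_line and i < len(lines):
--                 current_line = lines[i]
--
--                 # Check if this is the closing tag
--                 if current_line.strip().startswith(closing_tag):
--                     section_end_found = True
--                     # Add the closing tag and break
--                     result_lines.extend(section_content_lines)
--                     result_lines.append(current_line)
--                     i += 1
--                     break
--                 else:
--                     # Add this line to section content
--                     section_content_lines.append(current_line)
--                     i += 1
--
--             # If we reached the end without finding closing tag, add partial content
--             if not section_end_found and section_content_lines:
--                 result_lines.extend(section_content_lines)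
--                 # Add a temporary closing tag to make it valid
--                 result_lines.append(f'</{section_type}>')
--         elif line.startswith('</'):
--             # Skip standalone closing tags
--             i += 1
--         else:
--             # Only include non-tag content
--             if not (line.startswith('<') and line.endswith('>')):
--                 result_lines.append(lines[i])
--             i += 1
--
--     return '\n'.join(result_lines)
-- ===== SOURCE B (Python) =====
-- def _build_partial_content(lines, up_to_line):
--     """Single flat pass with an in-section flag instead of a nested section loop."""
--     out = []
--     in_section = False
--     close_tag = ''
--     end_tag = ''
--     had_content = False
--     i = 0
--     while i <= up_to_line and i < len(lines):
--         raw = lines[i]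
--         s = raw.strip()
--         if not in_section:
--             if s.startswith('<CODE') or s.startswith('<COMMANDS'):
--                 if s.startswith('<CODE'):
--                     close_tag, end_tag = '</CODE', '</CODE>'
--                 else:
--                     close_tag, end_tag = '</COMMANDS', '</COMMANDS>'
--                 out.append(raw)
--                 in_section = True
--                 had_content = False
--             elif s.startswith('</'):
--                 pass
--             elif not (s.startswith('<') and s.endswith('>')):
--                 out.append(raw)
--         else:
--             out.append(raw)
--             if s.startswith(close_tag):
--                 in_section = False
--             else:
--                 had_content = True
--         i += 1
--     if in_section and had_content:
--         out.append(end_tag)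
--     return '\n'.join(out)
-- ===== Notes on version B (the rewrite author's own statement) =====
-- stated objective: simpler
-- what changed: Replaces A's nested while loops (outer scan plus an inner section-content loop with a deferred buffer and section_end_found flag) by one flat pass keeping an in-section flag and a had_content flag, appending lines immediately and emitting the synthetic closing tag after the loop.
import Mathlib
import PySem

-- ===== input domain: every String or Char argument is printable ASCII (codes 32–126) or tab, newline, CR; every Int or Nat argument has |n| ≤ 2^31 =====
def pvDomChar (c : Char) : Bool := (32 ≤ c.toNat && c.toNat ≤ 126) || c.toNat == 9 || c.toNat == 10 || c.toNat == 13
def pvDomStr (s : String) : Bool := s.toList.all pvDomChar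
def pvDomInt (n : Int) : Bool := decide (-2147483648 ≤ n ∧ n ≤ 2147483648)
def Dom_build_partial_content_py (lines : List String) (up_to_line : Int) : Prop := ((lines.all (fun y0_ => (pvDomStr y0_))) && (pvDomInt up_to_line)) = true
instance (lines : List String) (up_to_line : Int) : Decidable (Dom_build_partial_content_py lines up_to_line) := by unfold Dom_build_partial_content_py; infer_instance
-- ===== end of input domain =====

-- B replaces A's nested section-scanning inner loop by one flat pass with an in-section flag (objective: simpler); return values proved equal on all inputs.

-- ===== PORT A =====
-- inner while loop of A: returns (section_content_lines, closing line if found, remaining lines, new i)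
def pvASec (closing : String) (up_to : Int) : List String → Int → (List String × Option String × List String × Int)
  | [], i => ([], none, [], i)
  | l :: rs, i =>
    if i ≤ up_to then
      if PySem.Str.startswith (PySem.Str.strip l) closing then ([], some l, rs, i + 1)
      else
        let r := pvASec closing up_to rs (i + 1)
        (l :: r.1, r.2.1, r.2.2.1, r.2.2.2)
    else ([], none, l :: rs, i)

theorem pvASec_len (closing : String) (up_to : Int) : ∀ (rest : List String) (i : Int),
    (pvASec closing up_to rest i).2.2.1.length ≤ rest.length := by
  intro rest
  induction rest with
  | nil => intro i; simp [pvASec]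
  | cons l rs ih =>
    intro i
    simp only [pvASec]
    split
    · split
      · simp
      · have := ih (i + 1)
        simpa using Nat.le_succ_of_le this
    · simp

-- outer while loop of A (f'</{section_type}' with section_type a literal is ported as the literal strings)
def pvALoop (up_to : Int) : List String → Int → List String
  | [], _ => []
  | l :: rs, i =>
    if i ≤ up_to then
      let s := PySem.Str.strip l
      if PySem.Str.startswith s "<CODE" || PySem.Str.startswith s "<COMMANDS" then
        let isCode := PySem.Str.startswith s "<CODE"
        let closing := if isCode then "</CODE" else "</COMMANDS"
        let r := pvASec closing up_to rs (i + 1)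
        match r.2.1 with
        | some cl => l :: (r.1 ++ cl :: pvALoop up_to r.2.2.1 r.2.2.2)
        | none =>
            l :: ((if r.1.isEmpty then [] else r.1 ++ [if isCode then "</CODE>" else "</COMMANDS>"])
                  ++ pvALoop up_to r.2.2.1 r.2.2.2)
      else if PySem.Str.startswith s "</" then pvALoop up_to rs (i + 1)
      else if PySem.Str.startswith s "<" && PySem.Str.endswith s ">" then pvALoop up_to rs (i + 1)
      else l :: pvALoop up_to rs (i + 1)
    else []
termination_by rest _ => rest.length
decreasing_by
  all_goals first
    | exact Nat.lt_succ_of_le (pvASec_len _ _ _ _)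
    | simp

def build_partial_content_py (lines : List String) (up_to_line : Int) : String :=
  PySem.Str.join "\n" (pvALoop up_to_line lines 0)

-- ===== PORT B =====
-- end-of-pass step: synthetic closing tag iff still inside a section that saw content
def pvBClose : Option (String × String × Bool) → List String
  | some (_, et, true) => [et]
  | _ => []

-- B's single flat loop; state = none (outside a section) or some (close_tag, end_tag, had_content)
def pvBLoop (up_to : Int) : List String → Int → Option (String × String × Bool) → List String
  | [], _, st => pvBClose st
  | l :: rs, i, st =>
    if i ≤ up_to then
      match st with
      | none =>
        let s := PySem.Str.strip l
        if PySem.Str.startswith s "<CODE" || PySem.Str.startswith s "<COMMANDS" then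
          l :: pvBLoop up_to rs (i + 1)
                (some (if PySem.Str.startswith s "<CODE" then ("</CODE", "</CODE>", false)
                       else ("</COMMANDS", "</COMMANDS>", false)))
        else if PySem.Str.startswith s "</" then pvBLoop up_to rs (i + 1) none
        else if PySem.Str.startswith s "<" && PySem.Str.endswith s ">" then pvBLoop up_to rs (i + 1) none
        else l :: pvBLoop up_to rs (i + 1) none
      | some (cl, et, _) =>
        if PySem.Str.startswith (PySem.Str.strip l) cl then l :: pvBLoop up_to rs (i + 1) none
        else l :: pvBLoop up_to rs (i + 1) (some (cl, et, true))
    else pvBClose st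

def build_partial_content_py_alt (lines : List String) (up_to_line : Int) : String :=
  PySem.Str.join "\n" (pvBLoop up_to_line lines 0 none)

-- ===== PRECONDITION & SPEC =====
def Spec_build_partial_content_py (lines : List String) (up_to_line : Int) (out : String) : Prop := out = build_partial_content_py_alt lines up_to_line
instance (lines : List String) (up_to_line : Int) (out : String) : Decidable (Spec_build_partial_content_py lines up_to_line out) := by unfold Spec_build_partial_content_py; infer_instance

-- ===== CLAIM (what is proved, stated in full; the proofs are below) =====
def Claim_equal_build_partial_content_py : Prop := ∀ (lines : List String) (up_to_line : Int), Dom_build_partial_content_py lines up_to_line → Spec_build_partial_content_py lines up_to_line (build_partial_content_py lines up_to_line)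

-- ===== LEMMAS AND PROOFS =====

-- what B's in-section state computes, phrased through A's inner loop
def pvSecSpec (up_to : Int) (cl et : String) (had : Bool) (rest : List String) (i : Int) : List String :=
  let r := pvASec cl up_to rest i
  match r.2.1 with
  | some c => r.1 ++ c :: pvALoop up_to r.2.2.1 r.2.2.2
  | none => (if had || !r.1.isEmpty then r.1 ++ [et] else []) ++ pvALoop up_to r.2.2.1 r.2.2.2

theorem pvALoop_stop (up_to : Int) (rest : List String) (i : Int) (h : ¬ i ≤ up_to) :
    pvALoop up_to rest i = [] := by
  cases rest with
  | nil => simp [pvALoop]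
  | cons l rs => rw [pvALoop]; simp [h]

theorem pv_key (up_to : Int) : ∀ (n : Nat) (rest : List String), rest.length ≤ n → ∀ (i : Int),
    (pvBLoop up_to rest i none = pvALoop up_to rest i) ∧
    (∀ cl et had, pvBLoop up_to rest i (some (cl, et, had)) = pvSecSpec up_to cl et had rest i) := by
  intro n
  induction n with
  | zero =>
    intro rest hlen i
    have : rest = [] := List.length_eq_zero_iff.mp (Nat.le_zero.mp hlen)
    subst this
    refine ⟨by simp [pvBLoop, pvALoop, pvBClose], ?_⟩
    intro cl et had
    cases had <;> simp [pvBLoop, pvBClose, pvSecSpec, pvASec, pvALoop]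
  | succ n ih =>
    intro rest hlen i
    cases rest with
    | nil =>
      refine ⟨by simp [pvBLoop, pvALoop, pvBClose], ?_⟩
      intro cl et had
      cases had <;> simp [pvBLoop, pvBClose, pvSecSpec, pvASec, pvALoop]
    | cons l rs =>
      have hrs : rs.length ≤ n := Nat.le_of_succ_le_succ (by simpa using hlen)
      constructor
      · -- outside a section
        by_cases hi : i ≤ up_to
        · rw [pvBLoop, pvALoop]
          simp only [hi, if_true]
          by_cases hopen : (PySem.Str.startswith (PySem.Str.strip l) "<CODE"
              || PySem.Str.startswith (PySem.Str.strip l) "<COMMANDS") = true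
          · rw [hopen]
            simp only [reduceIte]
            by_cases hc : PySem.Str.startswith (PySem.Str.strip l) "<CODE" = true
            · rw [hc]
              simp only [reduceIte]
              rw [(ih rs hrs (i + 1)).2 "</CODE" "</CODE>" false, pvSecSpec]
              cases hfound : (pvASec "</CODE" up_to rs (i + 1)).2.1 with
              | some c => simp
              | none =>
                simp only [Bool.false_or]
                by_cases he : (pvASec "</CODE" up_to rs (i + 1)).1.isEmpty = true <;>
                  simp [he]
            · rw [Bool.not_eq_true] at hc
              rw [hc]
              simp only [Bool.false_eq_true, reduceIte]
              rw [(ih rs hrs (i + 1)).2 "</COMMANDS" "</COMMANDS>" false, pvSecSpec]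
              cases hfound : (pvASec "</COMMANDS" up_to rs (i + 1)).2.1 with
              | some c => simp
              | none =>
                simp only [Bool.false_or]
                by_cases he : (pvASec "</COMMANDS" up_to rs (i + 1)).1.isEmpty = true <;>
                  simp [he]
          · rw [Bool.not_eq_true] at hopen
            rw [hopen]
            simp only [Bool.false_eq_true, reduceIte]
            by_cases hsk : PySem.Str.startswith (PySem.Str.strip l) "</" = true
            · rw [hsk]
              simp only [reduceIte]
              exact (ih rs hrs (i + 1)).1
            · rw [Bool.not_eq_true] at hsk
              rw [hsk]
              simp only [Bool.false_eq_true, reduceIte]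
              by_cases htag : (PySem.Str.startswith (PySem.Str.strip l) "<"
                  && PySem.Str.endswith (PySem.Str.strip l) ">") = true
              · rw [htag]
                simp only [reduceIte]
                exact (ih rs hrs (i + 1)).1
              · rw [Bool.not_eq_true] at htag
                rw [htag]
                simp only [Bool.false_eq_true, reduceIte]
                rw [(ih rs hrs (i + 1)).1]
        · rw [pvBLoop, pvALoop]
          simp [hi, pvBClose]
      · -- inside a section
        intro cl et had
        by_cases hi : i ≤ up_to
        · rw [pvBLoop]
          simp only [hi, if_true]
          by_cases hcl : PySem.Str.startswith (PySem.Str.strip l) cl = true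
          · rw [if_pos hcl, (ih rs hrs (i + 1)).1]
            simp only [pvSecSpec, pvASec]
            rw [if_pos hi, if_pos hcl]
            simp
          · rw [if_neg hcl, (ih rs hrs (i + 1)).2 cl et true]
            simp only [pvSecSpec, pvASec]
            rw [if_pos hi, if_neg hcl]
            cases hfound : (pvASec cl up_to rs (i + 1)).2.1 with
            | some c => simp
            | none => cases had <;> simp
        · rw [pvBLoop]
          simp only [hi, if_false]
          simp only [pvSecSpec, pvASec]
          rw [if_neg hi, pvALoop_stop up_to (l :: rs) i hi]
          cases had <;> simp [pvBClose]

-- ===== VERDICT (by name: the statement is the Claim_ definition above) =====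
theorem build_partial_content_py_spec : Claim_equal_build_partial_content_py := by
  intro lines up_to_line _
  unfold Spec_build_partial_content_py build_partial_content_py build_partial_content_py_alt
  rw [(pv_key up_to_line lines.length lines le_rfl 0).1]
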